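-- pv_equiv track=rewrite | github.com/piyush-khanna-qmb/Other-Projects | NFS/rottest.py | mostRecentCommand
-- ===== SOURCE A (Python) =====
-- def mostRecentCommand(got):
--     pos= ["left" , "centre", "right"]
--     Occ=[]
--     for i in pos:
--         p=got.rfind(i)
--         Occ.append(p)
--     j = [i for i in range(len(Occ)) if Occ[i]==max(Occ)][0]
--     return j
-- ===== SOURCE B (Python) =====
-- def mostRecentCommand(got):
--     pos = ["left", "centre", "right"]
--     i = len(got) - 1
--     while i >= 0:
--         for k, w in enumerate(pos):
--             if got[i:i+len(w)] == w:
--                 return k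
--         i -= 1
--     return 0
-- ===== Notes on version B (the rewrite author's own statement) =====
-- stated objective: alternative
-- what changed: Instead of computing rfind for each keyword, building the Occ list and taking its first argmax, B scans the string positions backwards once and returns the index of the first keyword that matches at the highest position (keywords have distinct first characters, so at most one matches per position; if none matches anywhere it returns 0, matching A's argmax of [-1,-1,-1]).
import Mathlib
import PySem

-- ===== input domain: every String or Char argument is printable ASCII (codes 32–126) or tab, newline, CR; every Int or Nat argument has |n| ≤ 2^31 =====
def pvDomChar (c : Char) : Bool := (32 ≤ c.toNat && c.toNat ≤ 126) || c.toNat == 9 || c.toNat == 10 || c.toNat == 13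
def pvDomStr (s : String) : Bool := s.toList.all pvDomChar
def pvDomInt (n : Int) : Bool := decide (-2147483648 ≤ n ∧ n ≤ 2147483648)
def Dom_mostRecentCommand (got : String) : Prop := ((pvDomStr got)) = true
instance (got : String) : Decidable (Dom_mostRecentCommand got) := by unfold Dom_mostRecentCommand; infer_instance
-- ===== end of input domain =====

-- B replaces A's per-keyword rfind + argmax over the Occ list by a single backward scan of the
-- string, returning the index of the first keyword matching at the highest position (the keywords
-- have distinct first characters, so at most one matches per position); objective: alternative.

-- ===== PORT A =====
def mostRecentCommand (got : String) : Int :=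
  let pos : List String := ["left", "centre", "right"]
  let Occ : List Int := pos.foldl (fun acc i => acc ++ [PySem.Str.rfind got i]) []
  -- max(Occ): Occ always has 3 elements, so max? is some and [0] below never raises
  let m : Int := (PySem.List.max? Occ (fun x => x)).getD 0
  ((PySem.List.pyRange 0 (Occ.length : Int) 1).filter
      (fun i => decide (PySem.List.pyGet? Occ i = some m))).headD 0

-- ===== PORT B =====
-- inner 'for k, w in enumerate(pos): if got[i:i+len(w)] == w: return k' of Source B
def pvHit (got : List Char) (i : Nat) : Option Int :=
  (PySem.List.enumerate (["left", "centre", "right"] : List String) 0).findSome?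
    (fun kw =>
      if PySem.List.slice got (some (i : Int)) (some ((i : Int) + ((kw.2.toList.length : Nat) : Int)))
          = kw.2.toList
      then some kw.1 else none)

-- outer 'while i >= 0: …; i -= 1' of Source B, i counting down; falling out returns 0
def pvScan (got : List Char) : Nat → Int
  | 0 => (pvHit got 0).getD 0
  | i + 1 =>
    match pvHit got (i + 1) with
    | some k => k
    | none => pvScan got i

def mostRecentCommand_alt (got : String) : Int :=
  -- i = len(got) - 1; the while loop runs iff len(got) > 0
  match got.toList.length with
  | 0 => 0
  | n + 1 => pvScan got.toList n

-- ===== PRECONDITION & SPEC =====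
def Spec_mostRecentCommand (got : String) (out : Int) : Prop := out = mostRecentCommand_alt got
instance (got : String) (out : Int) : Decidable (Spec_mostRecentCommand got out) := by unfold Spec_mostRecentCommand; infer_instance

-- ===== CLAIM (what is proved, stated in full; the proofs are below) =====
def Claim_equal_mostRecentCommand : Prop := ∀ (got : String), Dom_mostRecentCommand got → Spec_mostRecentCommand got (mostRecentCommand got)

-- ===== LEMMAS AND PROOFS =====

-- first index of the maximum of [a, b, c] — what A's max + filter + [0] computes
def pvF (a b c : Int) : Int :=
  if a = max (max a b) c then 0 else if b = max (max a b) c then 1 else 2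

lemma pvF_fst {a b c : Int} (h1 : b < a) (h2 : c < a) : pvF a b c = 0 := by
  simp [pvF, max_eq_left h1.le, max_eq_left h2.le]

lemma pvF_snd {a b c : Int} (h1 : a < b) (h2 : c < b) : pvF a b c = 1 := by
  simp [pvF, max_eq_right h1.le, max_eq_left h2.le, h1.ne]

lemma pvF_trd {a b c : Int} (h1 : a < c) (h2 : b < c) : pvF a b c = 2 := by
  have : max a b < c := max_lt h1 h2
  simp [pvF, max_eq_right this.le, h1.ne, h2.ne]

lemma pvF_none : pvF (-1) (-1) (-1) = 0 := by simp [pvF]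

-- A's body on Occ = [a, b, c] equals pvF a b c
lemma pvA_eq (a b c : Int) :
    (let Occ : List Int := [a, b, c]
     let m : Int := (PySem.List.max? Occ (fun x => x)).getD 0
     ((PySem.List.pyRange 0 (Occ.length : Int) 1).filter
        (fun i => decide (PySem.List.pyGet? Occ i = some m))).headD 0) = pvF a b c := by
  have hm : (PySem.List.max? [a, b, c] (fun x => x)).getD 0 = max (max a b) c := by
    rw [PySem.List.max?_id_cons]; rfl
  have hr : PySem.List.pyRange 0 ((([a, b, c] : List Int).length : Int)) 1 = [0, 1, 2] := by
    norm_num [PySem.List.pyRange_one]; decide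
  have g0 : PySem.List.pyGet? [a, b, c] (0 : Int) = some a := rfl
  have g1 : PySem.List.pyGet? [a, b, c] (1 : Int) = some b := rfl
  have g2 : PySem.List.pyGet? [a, b, c] (2 : Int) = some c := rfl
  simp only [hr, List.filter_cons, List.filter_nil, g0, g1, g2]
  generalize hG : (PySem.List.max? [a, b, c] fun x => x).getD 0 = M
  have hm' : M = max (max a b) c := hG ▸ hm
  have ha : a ≤ M := hm' ▸ le_trans (le_max_left a b) (le_max_left _ c)
  have hb : b ≤ M := hm' ▸ le_trans (le_max_right a b) (le_max_left _ c)
  have hc : c ≤ M := hm' ▸ le_max_right _ c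
  have hcases : M = a ∨ M = b ∨ M = c := by
    rcases max_choice (max a b) c with h | h
    · rcases max_choice a b with h2 | h2
      · exact Or.inl (by rw [hm', h, h2])
      · exact Or.inr (Or.inl (by rw [hm', h, h2]))
    · exact Or.inr (Or.inr (by rw [hm', h]))
  simp only [pvF, ← hm']
  clear hm' hm hG hr g0 g1 g2
  rcases hcases with h | h | h <;> subst h <;>
    split_ifs <;> simp_all

-- rfind.go facts (rfind.go got w j scans start positions j, j-1, …, 0 for w)
lemma pvGo_succ_no {got w : List Char} {j : Nat} (h : ¬ w <+: got.drop (j + 1)) :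
    PySem.Chars.rfind.go got w (j + 1) = PySem.Chars.rfind.go got w j := by
  simp [PySem.Chars.rfind.go, List.isPrefixOf_iff_prefix, h]

lemma pvGo_succ_yes {got w : List Char} {j : Nat} (h : w <+: got.drop (j + 1)) :
    PySem.Chars.rfind.go got w (j + 1) = ((j : Int) + 1) := by
  simp [PySem.Chars.rfind.go, List.isPrefixOf_iff_prefix, h]

lemma pvGo_zero (got w : List Char) :
    PySem.Chars.rfind.go got w 0 = if w <+: got then 0 else -1 := by
  simp [PySem.Chars.rfind.go, List.isPrefixOf_iff_prefix]

lemma pvGo_le (got w : List Char) (j : Nat) : PySem.Chars.rfind.go got w j ≤ (j : Int) := by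
  induction j with
  | zero => rw [pvGo_zero]; split <;> simp
  | succ n ih =>
    by_cases h : w <+: got.drop (n + 1)
    · rw [pvGo_succ_yes h]; push_cast; omega
    · rw [pvGo_succ_no h]; exact le_trans ih (by omega)

-- got[i:i+len(w)] == w  ↔  w is a prefix of got.drop i
lemma pvSlice_iff (got w : List Char) (i : Nat) :
    (PySem.List.slice got (some (i : Int)) (some ((i : Int) + (w.length : Int))) = w)
      ↔ w <+: got.drop i := by
  rw [PySem.List.slice_natCast_add]
  exact ⟨fun h => h ▸ List.take_prefix _ _, fun h => (List.prefix_iff_eq_take.mp h).symm⟩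

-- two nonempty strings matching at the same position share their first character
lemma pvHead_eq {a b : Char} {p q t : List Char} (h1 : (a :: p) <+: t) (h2 : (b :: q) <+: t) :
    a = b := by
  rcases h1 with ⟨u, rfl⟩
  exact ((List.cons_prefix_cons.mp h2).1).symm

-- pvHit, characterised by prefix tests
lemma pvHit_eq (got : List Char) (i : Nat) :
    pvHit got i =
      if "left".toList <+: got.drop i then some 0
      else if "centre".toList <+: got.drop i then some 1
      else if "right".toList <+: got.drop i then some 2
      else none := by
  have e : PySem.List.enumerate (["left", "centre", "right"] : List String) 0
      = [(0, "left"), (1, "centre"), (2, "right")] := by decide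
  simp only [pvHit, e, List.findSome?]
  simp only [pvSlice_iff]
  by_cases hl : ['l','e','f','t'] <+: got.drop i <;>
    by_cases hc : ['c','e','n','t','r','e'] <+: got.drop i <;>
      by_cases hr : ['r','i','g','h','t'] <+: got.drop i <;>
        simp [hl, hc, hr]

-- the key invariant: the backward scan up to position i computes the first argmax of the
-- rfind.go values truncated at i
lemma pvKey (got : List Char) : ∀ i : Nat,
    pvScan got i = pvF (PySem.Chars.rfind.go got "left".toList i)
                       (PySem.Chars.rfind.go got "centre".toList i)
                       (PySem.Chars.rfind.go got "right".toList i) := by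
  intro i
  induction i with
  | zero =>
    rw [pvScan, pvHit_eq]
    simp only [List.drop_zero, pvGo_zero]
    by_cases hl : ['l','e','f','t'] <+: got <;>
      by_cases hc : ['c','e','n','t','r','e'] <+: got <;>
        by_cases hr : ['r','i','g','h','t'] <+: got
    · exact absurd (pvHead_eq hl hc) (by decide)
    · exact absurd (pvHead_eq hl hc) (by decide)
    · exact absurd (pvHead_eq hl hr) (by decide)
    · simp [hl, hc, hr, pvF]
    · exact absurd (pvHead_eq hc hr) (by decide)
    · simp [hl, hc, hr, pvF]
    · simp [hl, hc, hr, pvF]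
    · simp [hl, hc, hr, pvF]
  | succ n ih =>
    rw [pvScan, pvHit_eq]
    by_cases hl : "left".toList <+: got.drop (n + 1) <;>
      by_cases hc : "centre".toList <+: got.drop (n + 1) <;>
        by_cases hr : "right".toList <+: got.drop (n + 1)
    · exact absurd (pvHead_eq hl hc) (by decide)
    · exact absurd (pvHead_eq hl hc) (by decide)
    · exact absurd (pvHead_eq hl hr) (by decide)
    · simp only [hl, hc, hr, if_true, if_false]
      rw [pvGo_succ_yes hl, pvGo_succ_no hc, pvGo_succ_no hr]
      exact (pvF_fst (lt_of_le_of_lt (pvGo_le got _ n) (by omega))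
        (lt_of_le_of_lt (pvGo_le got _ n) (by omega))).symm
    · exact absurd (pvHead_eq hc hr) (by decide)
    · simp only [hl, hc, hr, if_true, if_false]
      rw [pvGo_succ_no hl, pvGo_succ_yes hc, pvGo_succ_no hr]
      exact (pvF_snd (lt_of_le_of_lt (pvGo_le got _ n) (by omega))
        (lt_of_le_of_lt (pvGo_le got _ n) (by omega))).symm
    · simp only [hl, hc, hr, if_true, if_false]
      rw [pvGo_succ_no hl, pvGo_succ_no hc, pvGo_succ_yes hr]
      exact (pvF_trd (lt_of_le_of_lt (pvGo_le got _ n) (by omega))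
        (lt_of_le_of_lt (pvGo_le got _ n) (by omega))).symm
    · simp only [hl, hc, hr, if_false]
      rw [pvGo_succ_no hl, pvGo_succ_no hc, pvGo_succ_no hr]
      exact ih

-- Str.rfind reduced to rfind.go at start index len - 1 (no keyword is nonempty-prefix of drop len)
lemma pvRfind_eq (got : String) (w : String) (hw : w.toList ≠ []) {n : Nat}
    (h : got.toList.length = n + 1) :
    PySem.Str.rfind got w = PySem.Chars.rfind.go got.toList w.toList n := by
  have : PySem.Str.rfind got w = PySem.Chars.rfind.go got.toList w.toList got.toList.length := by
    simp [PySem.Chars.rfind]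
  rw [this, h, pvGo_succ_no]
  rw [List.drop_eq_nil_of_le (by omega)]
  simp [hw]

-- ===== VERDICT (by name: the statement is the Claim_ definition above) =====
theorem mostRecentCommand_spec : Claim_equal_mostRecentCommand := by
  intro got _
  show mostRecentCommand got = mostRecentCommand_alt got
  have hA : mostRecentCommand got
      = pvF (PySem.Str.rfind got "left") (PySem.Str.rfind got "centre")
            (PySem.Str.rfind got "right") :=
    pvA_eq (PySem.Str.rfind got "left") (PySem.Str.rfind got "centre")
      (PySem.Str.rfind got "right")
  rw [hA]
  cases h : got.toList.length with
  | zero =>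
    have hnil : got.toList = [] := List.length_eq_zero_iff.mp h
    have hr : ∀ w : String, w.toList ≠ [] → PySem.Str.rfind got w = -1 := by
      intro w hw
      have : PySem.Str.rfind got w = PySem.Chars.rfind.go got.toList w.toList got.toList.length := by
        simp [PySem.Chars.rfind]
      rw [this, h, pvGo_zero, hnil]
      simp [hw]
    rw [hr "left" (by decide), hr "centre" (by decide), hr "right" (by decide)]
    simp [mostRecentCommand_alt, h, pvF_none]
  | succ n =>
    rw [pvRfind_eq got "left" (by decide) h, pvRfind_eq got "centre" (by decide) h,
      pvRfind_eq got "right" (by decide) h]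
    rw [show mostRecentCommand_alt got = pvScan got.toList n by
      unfold mostRecentCommand_alt; rw [h]]
    exact (pvKey got.toList n).symm
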